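-- pv_equiv track=rewrite | github.com/MarcTheSpark/scamp | scamp/simple_rtmidi_wrapper.py | get_best_name_match
-- ===== SOURCE A (Python) =====
-- def get_best_name_match(names_list, desired_name):
--     """
--     Looks initially for first exact case-sensitive match for desired_name in names_list. Then looks for
--     first case insensitive match. Then looks for anything containing desired_name (case insensitive).
--     Outputs None if this all fails
--
--     :param names_list: list of names to search through
--     :param desired_name: name to match
--     :return: str of best match to desired name in names_list
--     """
--     if desired_name is None:
--         return None
--     if desired_name in names_list:
--         return names_list.index(desired_name)
--     lower_case_list = [s.lower() for s in names_list]
--     lower_case_desired_name = desired_name.lower()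
--     if lower_case_desired_name in lower_case_list:
--         return lower_case_list.index(lower_case_desired_name)
--     for lower_case_name in lower_case_list:
--         if lower_case_desired_name in lower_case_name:
--             return lower_case_list.index(lower_case_name)
--     return None
-- ===== SOURCE B (Python) =====
-- def get_best_name_match(names_list, desired_name):
--     """Single-pass re-implementation: one enumerate loop tracking the first
--     exact, case-insensitive and substring match indices."""
--     if desired_name is None:
--         return None
--     lower_case_desired_name = desired_name.lower()
--     exact_idx = None
--     ci_idx = None
--     sub_idx = None
--     for i, name in enumerate(names_list):
--         lower_name = name.lower()
--         if exact_idx is None and name == desired_name: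
--             exact_idx = i
--         if ci_idx is None and lower_name == lower_case_desired_name:
--             ci_idx = i
--         if sub_idx is None and lower_case_desired_name in lower_name:
--             sub_idx = i
--     if exact_idx is not None:
--         return exact_idx
--     if ci_idx is not None:
--         return ci_idx
--     return sub_idx
-- ===== Notes on version B (the rewrite author's own statement) =====
-- stated objective: alternative
-- what changed: Replaces A's three priority-ordered scans (membership test + .index, a precomputed lowercase copy with another membership/.index, and a substring loop that re-searches with .index) by one enumerate pass that lowercases each name inline and records the first exact, case-insensitive and substring match indices, choosing among them afterwards.
import Mathlib
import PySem

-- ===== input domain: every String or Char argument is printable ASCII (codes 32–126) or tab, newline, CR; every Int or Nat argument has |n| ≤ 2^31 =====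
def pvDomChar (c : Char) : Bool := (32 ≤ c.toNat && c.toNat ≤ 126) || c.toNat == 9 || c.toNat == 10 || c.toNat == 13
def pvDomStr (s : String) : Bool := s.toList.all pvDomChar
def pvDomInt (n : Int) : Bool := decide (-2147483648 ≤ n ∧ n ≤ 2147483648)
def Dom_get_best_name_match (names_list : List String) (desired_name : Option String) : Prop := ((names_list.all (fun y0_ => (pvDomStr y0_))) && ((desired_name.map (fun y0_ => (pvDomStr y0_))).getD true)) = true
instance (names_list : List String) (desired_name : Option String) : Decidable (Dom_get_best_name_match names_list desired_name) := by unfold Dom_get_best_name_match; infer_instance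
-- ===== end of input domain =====

-- B replaces A's three priority-ordered scans by a single enumerate pass tracking the first
-- exact / case-insensitive / substring match indices (alternative decomposition, same cost).

-- ===== PORT A =====
-- the final `for lower_case_name in lower_case_list: if lcd in lower_case_name: return lower_case_list.index(lower_case_name)`
def pvLoopA (full : List String) (lcd : String) : List String → Option Int
  | [] => none
  | n :: rest =>
    if PySem.Str.isIn lcd n then (PySem.List.index? full n).map (fun k => (k : Int))
    else pvLoopA full lcd rest

def get_best_name_match (names_list : List String) (desired_name : Option String) : Option Int :=
  match desired_name with
  | none => none
  | some d =>
    if names_list.contains d then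
      (PySem.List.index? names_list d).map (fun k => (k : Int))
    else
      let lower_case_list := names_list.map PySem.Str.lower
      let lower_case_desired_name := PySem.Str.lower d
      if lower_case_list.contains lower_case_desired_name then
        (PySem.List.index? lower_case_list lower_case_desired_name).map (fun k => (k : Int))
      else
        pvLoopA lower_case_list lower_case_desired_name lower_case_list

-- ===== PORT B =====
-- one step of Source B's loop body over (i, name), state = (exact_idx, ci_idx, sub_idx)
def pvAltStep (d lcd : String) (st : Option Int × Option Int × Option Int) (p : Int × String) :
    Option Int × Option Int × Option Int :=
  let lower_name := PySem.Str.lower p.2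
  ( (if st.1.isNone && (p.2 == d) then some p.1 else st.1),
    (if st.2.1.isNone && (lower_name == lcd) then some p.1 else st.2.1),
    (if st.2.2.isNone && PySem.Str.isIn lcd lower_name then some p.1 else st.2.2) )

def get_best_name_match_alt (names_list : List String) (desired_name : Option String) : Option Int :=
  match desired_name with
  | none => none
  | some d =>
    let lcd := PySem.Str.lower d
    let st := (PySem.List.enumerate names_list 0).foldl (pvAltStep d lcd) (none, none, none)
    match st.1 with
    | some v => some v
    | none =>
      match st.2.1 with
      | some v => some v
      | none => st.2.2

-- ===== PRECONDITION & SPEC =====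
def Spec_get_best_name_match (names_list : List String) (desired_name : Option String) (out : Option Int) : Prop := out = get_best_name_match_alt names_list desired_name
instance (names_list : List String) (desired_name : Option String) (out : Option Int) : Decidable (Spec_get_best_name_match names_list desired_name out) := by unfold Spec_get_best_name_match; infer_instance

-- ===== CLAIM (what is proved, stated in full; the proofs are below) =====
def Claim_equal_get_best_name_match : Prop := ∀ (names_list : List String) (desired_name : Option String), Dom_get_best_name_match names_list desired_name → Spec_get_best_name_match names_list desired_name (get_best_name_match names_list desired_name)

-- ===== LEMMAS AND PROOFS =====

-- B's fold computes the three first-match indices (findIdx? shifted by the enumerate start)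
theorem pvAltFold_eq (d lcd : String) :
    ∀ (xs : List String) (s : Int) (acc : Option Int × Option Int × Option Int),
    (PySem.List.enumerate xs s).foldl (pvAltStep d lcd) acc =
      (acc.1.or ((xs.findIdx? (fun x => x == d)).map (fun k => s + k)),
       acc.2.1.or ((xs.findIdx? (fun x => PySem.Str.lower x == lcd)).map (fun k => s + k)),
       acc.2.2.or ((xs.findIdx? (fun x => PySem.Str.isIn lcd (PySem.Str.lower x))).map (fun k => s + k))) := by
  intro xs
  induction xs with
  | nil => intro s acc; simp [PySem.List.enumerate_nil]
  | cons x xs ih =>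
    intro s acc
    obtain ⟨e, c, u⟩ := acc
    rw [PySem.List.enumerate_cons, List.foldl_cons, ih]
    refine Prod.ext ?_ (Prod.ext ?_ ?_) <;>
      simp only [pvAltStep, List.findIdx?_cons] <;>
      [cases e; cases c; cases u] <;>
      split <;>
      rcases h : List.findIdx? _ xs with _ | k <;>
      simp_all [Option.or] <;> omega

theorem pvIndex?_eq_findIdx? (xs : List String) (v : String) :
    PySem.List.index? xs v = xs.findIdx? (fun x => x == v) := by
  rw [PySem.List.index?_eq_idxOf?]; simp [List.idxOf?]

-- A's substring loop returns the index of the first lowercase name containing lcd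
theorem pvLoopA_aux (lcd : String) :
    ∀ (rem pre : List String), (∀ y ∈ pre, PySem.Str.isIn lcd y = false) →
    pvLoopA (pre ++ rem) lcd rem =
      (List.findIdx? (fun n => PySem.Str.isIn lcd n) (pre ++ rem)).map (fun k => (k : Int)) := by
  intro rem
  induction rem with
  | nil =>
    intro pre hpre
    have h0 : List.findIdx? (fun n => PySem.Str.isIn lcd n) (pre ++ []) = none := by
      rw [List.findIdx?_eq_none_iff]; simpa using hpre
    rw [h0]; rfl
  | cons n rest ih =>
    intro pre hpre
    by_cases h : PySem.Str.isIn lcd n = true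
    · have hnotmem : n ∉ pre := fun hm => by
        rw [hpre n hm] at h; exact Bool.false_ne_true h
      have hidx : PySem.List.index? (pre ++ n :: rest) n = some pre.length :=
        (PySem.List.index?_eq_some_iff _ _ _).mpr ⟨pre, rest, rfl, rfl, hnotmem⟩
      have hfa : List.findIdx? (fun n => PySem.Str.isIn lcd n) pre = none := by
        rw [List.findIdx?_eq_none_iff]; exact hpre
      simp only [pvLoopA]
      rw [if_pos h, hidx, List.findIdx?_append, hfa, Option.none_or, List.findIdx?_cons]
      rw [if_pos h]
      simp
    · have hlow : PySem.Str.isIn lcd n = false := Bool.eq_false_iff.mpr h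
      have heq : pre ++ n :: rest = (pre ++ [n]) ++ rest := by simp
      have hpre' : ∀ y ∈ pre ++ [n], PySem.Str.isIn lcd y = false := by
        intro y hy
        rcases List.mem_append.mp hy with hy | hy
        · exact hpre y hy
        · rw [List.mem_singleton] at hy; subst hy; exact hlow
      calc pvLoopA (pre ++ n :: rest) lcd (n :: rest)
          = pvLoopA (pre ++ n :: rest) lcd rest := by
            simp only [pvLoopA]; rw [if_neg h]
        _ = pvLoopA ((pre ++ [n]) ++ rest) lcd rest := by rw [← heq]
        _ = (List.findIdx? (fun n => PySem.Str.isIn lcd n) ((pre ++ [n]) ++ rest)).map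
              (fun k => (k : Int)) := ih _ hpre'
        _ = (List.findIdx? (fun n => PySem.Str.isIn lcd n) (pre ++ n :: rest)).map
              (fun k => (k : Int)) := by rw [← heq]

theorem get_best_name_match_spec : Claim_equal_get_best_name_match := by
  intro xs d _
  unfold Spec_get_best_name_match get_best_name_match get_best_name_match_alt
  cases d with
  | none => rfl
  | some d =>
    simp only
    rw [pvAltFold_eq]
    simp only [Option.none_or, zero_add]
    by_cases h1 : d ∈ xs
    · have hk' : (xs.findIdx? (fun x => x == d)).isSome := by
        rw [List.findIdx?_isSome]; exact List.any_eq_true.mpr ⟨d, h1, by simp⟩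
      obtain ⟨k, hk⟩ := Option.isSome_iff_exists.mp hk'
      rw [pvIndex?_eq_findIdx?]
      simp [h1, hk]
    · have hE : xs.findIdx? (fun x => x == d) = none := by
        rw [List.findIdx?_eq_none_iff]
        intro x hx
        exact beq_eq_false_iff_ne.mpr (fun he => h1 (he ▸ hx))
      have hmapE : PySem.List.index? (xs.map PySem.Str.lower) (PySem.Str.lower d)
          = xs.findIdx? (fun x => PySem.Str.lower x == PySem.Str.lower d) := by
        rw [pvIndex?_eq_findIdx?, List.findIdx?_map]; rfl
      by_cases h2 : PySem.Str.lower d ∈ xs.map PySem.Str.lower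
      · have hk' : ((xs.map PySem.Str.lower).findIdx? (fun x => x == PySem.Str.lower d)).isSome := by
          rw [List.findIdx?_isSome]; exact List.any_eq_true.mpr ⟨_, h2, by simp⟩
        rw [List.findIdx?_map] at hk'
        obtain ⟨k, hk⟩ := Option.isSome_iff_exists.mp hk'
        have hkS : xs.findIdx? (fun x => PySem.Str.lower x == PySem.Str.lower d) = some k := hk
        have hIdx : List.idxOf? (PySem.Str.lower d) (xs.map PySem.Str.lower) = some k := by
          rw [← PySem.List.index?_eq_idxOf?, hmapE, hkS]
        simp [h1, h2, hE, hkS, hIdx]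
      · have hC : xs.findIdx? (fun x => PySem.Str.lower x == PySem.Str.lower d) = none := by
          have h0 : (xs.map PySem.Str.lower).findIdx? (fun x => x == PySem.Str.lower d) = none := by
            rw [List.findIdx?_eq_none_iff]
            intro x hx
            exact beq_eq_false_iff_ne.mpr (fun he => h2 (he ▸ hx))
          rw [List.findIdx?_map] at h0
          exact h0
        have hloop := pvLoopA_aux (PySem.Str.lower d) (xs.map PySem.Str.lower) [] (by simp)
        simp only [List.nil_append] at hloop
        have hU : pvLoopA (xs.map PySem.Str.lower) (PySem.Str.lower d) (xs.map PySem.Str.lower)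
            = (xs.findIdx? (fun x => PySem.Str.isIn (PySem.Str.lower d) (PySem.Str.lower x))).map
                (fun k => (k : Int)) := by
          rw [hloop, List.findIdx?_map]; rfl
        simp [h1, h2, hE, hC, hU]
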